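-- pv_equiv track=rewrite | github.com/berryscottr/apa-rankings | lineups.py | calc_lineups
-- ===== SOURCE A (Python) =====
-- import itertools
--
-- def unique_lineups(subsets):
--     cleaned_subsets = []
--     for combination in subsets:
--         if combination not in cleaned_subsets:
--             cleaned_subsets.append(combination)
--     return cleaned_subsets
--
-- def calc_lineups(players, num, max_total):
--     subsets = []
--     for L in range(0, len(players) + 1):
--         for subset in itertools.combinations(players, num):
--             subset = sorted(list(subset), reverse=True)
--             if sum(subset) == max_total:
--                 subsets.append(subset)
--     cleaned_subsets = unique_lineups(subsets)
--     return cleaned_subsets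
-- ===== SOURCE B (Python) =====
-- def calc_lineups(players, num, max_total):
--     n = len(players)
--     results = []
--
--     def helper(start, chosen, running_sum):
--         if len(chosen) == num:
--             if running_sum == max_total:
--                 results.append(sorted(chosen, reverse=True))
--             return
--         if start == n:
--             return
--         helper(start + 1, chosen + [players[start]], running_sum + players[start])
--         helper(start + 1, chosen, running_sum)
--
--     helper(0, [], 0)
--
--     seen = set()
--     lineups = []
--     for lineup in results:
--         key = tuple(lineup)
--         if key not in seen:
--             seen.add(key)
--             lineups.append(lineup)
--     return lineups
-- ===== Notes on version B (the rewrite author's own statement) =====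
-- stated objective: alternative
-- what changed: Replaces the len(players)+1-fold repetition of an itertools.combinations scan plus quadratic list-membership dedup with a single recursive backtracking pass over the players that maintains the partial lineup and its running sum, followed by a set-based first-occurrence dedup.
-- outside the precondition, e.g. on calc_lineups([1], -1, 0): A raises ValueError, B returns []
-- crash fix: On num < 0 A raises ValueError (from itertools.combinations); B returns []. — e.g. on calc_lineups([1], -1, 0): A raises ValueError, B returns []
import Mathlib
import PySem

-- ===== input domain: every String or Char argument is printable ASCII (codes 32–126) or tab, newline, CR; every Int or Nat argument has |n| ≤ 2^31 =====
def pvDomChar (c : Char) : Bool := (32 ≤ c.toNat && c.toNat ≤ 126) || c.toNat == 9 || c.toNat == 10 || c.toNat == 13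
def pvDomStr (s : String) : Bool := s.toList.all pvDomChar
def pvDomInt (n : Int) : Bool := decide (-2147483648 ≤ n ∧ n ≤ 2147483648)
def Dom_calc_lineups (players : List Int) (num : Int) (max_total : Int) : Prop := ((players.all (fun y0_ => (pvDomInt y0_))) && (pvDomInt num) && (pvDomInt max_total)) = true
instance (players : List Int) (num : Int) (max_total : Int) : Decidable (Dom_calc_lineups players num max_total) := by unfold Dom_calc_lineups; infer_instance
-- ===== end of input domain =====

-- B replaces A's (len+1)-fold repetition of a combinations scan + list-membership dedup by one
-- recursive backtracking pass (partial lineup + running sum) and a set-based first-occurrence dedup.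

-- ===== PORT A =====
def unique_lineups (subsets : List (List Int)) : List (List Int) :=
  subsets.foldl (fun cleaned combination =>
    if combination ∈ cleaned then cleaned else cleaned ++ [combination]) []

def calc_lineups (players : List Int) (num : Int) (max_total : Int) : List (List Int) :=
  -- num.toNat: faithful for 0 ≤ num; for num < 0 Python raises ValueError (excluded by Pre_)
  let subsets :=
    (PySem.List.pyRange 0 (PySem.List.len players + 1) 1).foldl
      (fun subsets _L =>
        (PySem.List.combinations players num.toNat).foldl
          (fun subsets subset =>
            let subset := PySem.List.sorted subset (fun x => x) true
            if subset.sum == max_total then subsets ++ [subset] else subsets)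
          subsets)
      []
  unique_lineups subsets

-- ===== PORT B =====
-- helper(start, chosen, running_sum) of Source B; 'rest' is the suffix players[start:] (start == n ↔ rest = []),
-- and the shared 'results' list becomes the returned list
def pvHelper (num max_total : Int) : List Int → List Int → Int → List (List Int)
  | [], chosen, running_sum =>
      if PySem.List.len chosen == num then
        if running_sum == max_total then [PySem.List.sorted chosen (fun x => x) true] else []
      else []
  | x :: xs, chosen, running_sum =>
      if PySem.List.len chosen == num then
        if running_sum == max_total then [PySem.List.sorted chosen (fun x => x) true] else []
      else
        pvHelper num max_total xs (chosen ++ [x]) (running_sum + x) ++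
        pvHelper num max_total xs chosen running_sum

def calc_lineups_alt (players : List Int) (num : Int) (max_total : Int) : List (List Int) :=
  let results := pvHelper num max_total players [] 0
  -- tuple(lineup) keys of the Python set are modelled by the lists themselves
  (results.foldl
    (fun (st : PySem.Set (List Int) × List (List Int)) lineup =>
      if PySem.Set.contains st.1 lineup then st
      else (PySem.Set.add st.1 lineup, st.2 ++ [lineup]))
    (PySem.Set.empty, [])).2

-- ===== PRECONDITION & SPEC =====
-- A raises ValueError (itertools.combinations with negative r) when num < 0; nothing else is excluded.
def Pre_calc_lineups (players : List Int) (num : Int) (max_total : Int) : Prop := 0 ≤ num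
instance (players : List Int) (num : Int) (max_total : Int) : Decidable (Pre_calc_lineups players num max_total) := by unfold Pre_calc_lineups; infer_instance
def pvWitness_calc_lineups : List Int × Int × Int := ([1, 2, 3], 2, 5)

-- On num < 0 A raises ValueError (from itertools.combinations); B returns [].
def Raises_calc_lineups (players : List Int) (num : Int) (max_total : Int) : Prop := num < 0
instance (players : List Int) (num : Int) (max_total : Int) : Decidable (Raises_calc_lineups players num max_total) := by unfold Raises_calc_lineups; infer_instance
def pvRaiseWitness_calc_lineups : List Int × Int × Int := ([1], -1, 0)
def pvRaiseWitnessOut_calc_lineups : List (List Int) := []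

def Spec_calc_lineups (players : List Int) (num : Int) (max_total : Int) (out : List (List Int)) : Prop := out = calc_lineups_alt players num max_total
instance (players : List Int) (num : Int) (max_total : Int) (out : List (List Int)) : Decidable (Spec_calc_lineups players num max_total out) := by unfold Spec_calc_lineups; infer_instance

-- ===== CLAIM (what is proved, stated in full; the proofs are below) =====
def Claim_equal_calc_lineups : Prop := ∀ (players : List Int) (num : Int) (max_total : Int), Dom_calc_lineups players num max_total → Pre_calc_lineups players num max_total → Spec_calc_lineups players num max_total (calc_lineups players num max_total)
def Claim_raises_calc_lineups : Prop := (∀ (players : List Int) (num : Int) (max_total : Int), Dom_calc_lineups players num max_total → Raises_calc_lineups players num max_total → ¬ Pre_calc_lineups players num max_total) ∧ (Dom_calc_lineups (pvRaiseWitness_calc_lineups.1) (pvRaiseWitness_calc_lineups.2.1) (pvRaiseWitness_calc_lineups.2.2) ∧ Raises_calc_lineups (pvRaiseWitness_calc_lineups.1) (pvRaiseWitness_calc_lineups.2.1) (pvRaiseWitness_calc_lineups.2.2) ∧ calc_lineups_alt (pvRaiseWitness_calc_lineups.1) (pvRaiseWitness_calc_lineups.2.1) (pvRaiseWitness_calc_lineups.2.2)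 = pvRaiseWitnessOut_calc_lineups)

-- ===== LEMMAS AND PROOFS =====

-- the common normal form: qualifying combinations, each sorted descending
def pvSel (max_total : Int) (chosen : List Int) (cs : List (List Int)) : List (List Int) :=
  ((cs.filter (fun c => (chosen ++ c).sum == max_total)).map
    (fun c => PySem.List.sorted (chosen ++ c) (fun x => x) true))

lemma pvHelper_eq (num max_total : Int) :
    ∀ (rest chosen : List Int) (s : Int), s = chosen.sum → (chosen.length : Int) ≤ num →
      pvHelper num max_total rest chosen s =
        pvSel max_total chosen (PySem.List.combinations rest (num - chosen.length).toNat) := by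
  intro rest
  induction rest with
  | nil =>
      intro chosen s hs hle
      simp only [pvHelper]
      by_cases h : (chosen.length : Int) = num
      · have h0 : (num - (chosen.length : Int)).toNat = 0 := by omega
        rw [h0, PySem.List.combinations_zero]
        unfold pvSel
        by_cases hm : chosen.sum = max_total <;>
          simp [PySem.List.len_eq, h, hs, hm]
      · have hlt : (chosen.length : Int) < num := lt_of_le_of_ne hle h
        have hk : (num - (chosen.length : Int)).toNat = (num - chosen.length - 1).toNat + 1 := by omega
        rw [hk, PySem.List.combinations_nil_succ]
        simp [pvSel, PySem.List.len_eq, h]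
  | cons x xs ih =>
      intro chosen s hs hle
      simp only [pvHelper]
      by_cases h : (chosen.length : Int) = num
      · have h0 : (num - (chosen.length : Int)).toNat = 0 := by omega
        rw [h0, PySem.List.combinations_zero]
        unfold pvSel
        by_cases hm : chosen.sum = max_total <;>
          simp [PySem.List.len_eq, h, hs, hm]
      · have hlt : (chosen.length : Int) < num := lt_of_le_of_ne hle h
        simp only [PySem.List.len_eq, beq_iff_eq, h, if_false]
        rw [ih (chosen ++ [x]) (s + x) (by simp [hs]) (by simp; omega),
            ih chosen s hs (le_of_lt hlt)]
        have hidx1 : (num - (((chosen ++ [x]).length : Nat) : Int)).toNat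
            = (num - (chosen.length : Int) - 1).toNat := by
          simp only [List.length_append, List.length_cons, List.length_nil]
          push_cast
          omega
        have hk : (num - (chosen.length : Int)).toNat = (num - (chosen.length : Int) - 1).toNat + 1 := by
          omega
        rw [hidx1, hk, PySem.List.combinations_cons_succ]
        unfold pvSel
        simp only [List.filter_append, List.filter_map, List.map_append, List.map_map]
        congr 1
        simp [Function.comp_def, List.append_assoc]

-- the list-membership dedup fold of A
def pvUStep (a : List (List Int)) (c : List Int) : List (List Int) :=
  if c ∈ a then a else a ++ [c]

lemma mem_uniq_foldl : ∀ (ys : List (List Int)) (acc : List (List Int)) (x : List Int),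
    (x ∈ acc ∨ x ∈ ys) → x ∈ ys.foldl pvUStep acc := by
  intro ys
  induction ys with
  | nil => intro acc x h; simpa using h.resolve_right (by simp)
  | cons y t ih =>
      intro acc x h
      simp only [List.foldl_cons]
      apply ih
      rcases h with h | h
      · left; by_cases hy : y ∈ acc <;> simp [pvUStep, hy, h]
      · rcases List.mem_cons.mp h with rfl | h
        · left; by_cases hy : x ∈ acc <;> simp [pvUStep, hy]
        · right; exact h

lemma uniq_foldl_fixed : ∀ (ys : List (List Int)) (acc : List (List Int)),
    (∀ y ∈ ys, y ∈ acc) → ys.foldl pvUStep acc = acc := by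
  intro ys
  induction ys with
  | nil => intro acc _; rfl
  | cons y t ih =>
      intro acc h
      have hy : y ∈ acc := h y (by simp)
      simp only [List.foldl_cons, pvUStep, hy, if_true]
      exact ih acc (fun z hz => h z (by simp [hz]))

lemma uniq_flatMap_const (S : List (List Int)) :
    ∀ (L : List Int), L ≠ [] →
      (L.flatMap (fun _ => S)).foldl pvUStep [] = S.foldl pvUStep [] := by
  intro L hL
  cases L with
  | nil => exact absurd rfl hL
  | cons a t =>
      have hsub : ∀ y ∈ t.flatMap (fun _ : Int => S), y ∈ S.foldl pvUStep [] := by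
        intro y hy
        rcases List.mem_flatMap.mp hy with ⟨_, _, hyS⟩
        exact mem_uniq_foldl S [] y (Or.inr hyS)
      simp only [List.flatMap_cons, List.foldl_append]
      exact uniq_foldl_fixed _ _ hsub

lemma set_dedup_eq : ∀ (xs : List (List Int)) (seen : PySem.Set (List Int)) (out : List (List Int)),
    (∀ x, x ∈ seen ↔ x ∈ out) →
    (xs.foldl
      (fun (st : PySem.Set (List Int) × List (List Int)) lineup =>
        if PySem.Set.contains st.1 lineup then st
        else (PySem.Set.add st.1 lineup, st.2 ++ [lineup]))
      (seen, out)).2 = xs.foldl pvUStep out := by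
  intro xs
  induction xs with
  | nil => intro seen out _; rfl
  | cons x t ih =>
      intro seen out hinv
      by_cases hx : x ∈ out
      · have hc : PySem.Set.contains seen x = true := (PySem.Set.contains_iff seen x).mpr ((hinv x).mpr hx)
        simp only [List.foldl_cons, hc, if_true, pvUStep, hx, if_true]
        exact ih seen out hinv
      · have hc : PySem.Set.contains seen x = false := by
          rw [Bool.eq_false_iff, Ne, PySem.Set.contains_iff seen x]
          exact fun h => hx ((hinv x).mp h)
        simp only [List.foldl_cons, hc, Bool.false_eq_true, if_false, pvUStep, hx, if_false]
        apply ih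
        intro y
        rw [PySem.Set.mem_add]
        simp [hinv y, or_comm]

-- ===== VERDICT (by name: the statement is the Claim_ definition above) =====
theorem calc_lineups_spec : Claim_equal_calc_lineups := by
  intro players num max_total _ hpre
  have hpre' : (0 : Int) ≤ num := hpre
  unfold Spec_calc_lineups calc_lineups calc_lineups_alt unique_lineups
  simp only []
  -- B's backtracking pass equals the qualifying-combinations normal form
  have hB : pvHelper num max_total players [] 0 =
      pvSel max_total [] (PySem.List.combinations players num.toNat) := by
    have h := pvHelper_eq num max_total players [] 0 (by simp) (by simpa using hpre')
    simpa using h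
  -- sum of the descending sort is the sum
  have hsum : (fun c : List Int => ((PySem.List.sorted c (fun x => x) true).sum == max_total)) =
      (fun c : List Int => (c.sum == max_total)) := by
    funext c
    rw [(PySem.List.sorted_perm c (fun x => x) true).sum_eq]
  -- A's inner combinations scan appends exactly pvSel max_total [] …
  have hinner : ∀ acc : List (List Int),
      (PySem.List.combinations players num.toNat).foldl
        (fun subsets subset =>
          if (PySem.List.sorted subset (fun x => x) true).sum == max_total then
            subsets ++ [PySem.List.sorted subset (fun x => x) true] else subsets) acc
      = acc ++ pvSel max_total [] (PySem.List.combinations players num.toNat) := by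
    intro acc
    rw [PySem.List.foldl_append_if]
    unfold pvSel
    rw [hsum]
    simp
  simp only [hinner]
  rw [PySem.List.foldl_append_eq_flatMap]
  -- the dedup folds: A's list-membership fold is pvUStep
  have hstepA : (fun (cleaned : List (List Int)) (combination : List Int) =>
      if combination ∈ cleaned then cleaned else cleaned ++ [combination]) = pvUStep := rfl
  rw [List.nil_append, hstepA, hB]
  -- A repeats the same pass over a nonempty range: dedup collapses it
  have hrng : PySem.List.pyRange 0 (PySem.List.len players + 1) 1 ≠ [] := by
    apply List.ne_nil_of_length_pos
    rw [PySem.List.length_pyRange_one]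
    simp [PySem.List.len_eq]
  rw [uniq_flatMap_const _ _ hrng]
  -- B's set-based dedup is the same first-occurrence fold
  have hset := set_dedup_eq (pvSel max_total [] (PySem.List.combinations players num.toNat))
      PySem.Set.empty [] (by simp [PySem.Set.empty])
  rw [hset]

@[simp]
theorem calc_lineups_raises : Claim_raises_calc_lineups := by
  unfold Claim_raises_calc_lineups
  exact ⟨fun _ _ _ _ hr => by unfold Pre_calc_lineups; unfold Raises_calc_lineups at hr; omega,
         by decide⟩
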